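-- pv_equiv track=rewrite | github.com/IlyaGusev/SaigaBot | src/bot.py | _fix_broken_tool_calls
-- ===== SOURCE A (Python) =====
-- def _fix_broken_tool_calls(messages):
--     clean_messages = []
--     is_expecting_tool_answer = False
--     for m in messages:
--         if is_expecting_tool_answer and "tool_call_id" not in m:
--             clean_messages = clean_messages[:-1]
--         is_expecting_tool_answer = "tool_calls" in m
--         clean_messages.append(m)
--     if is_expecting_tool_answer:
--         clean_messages = clean_messages[:-1]
--     return clean_messages
-- ===== SOURCE B (Python) =====
-- def _fix_broken_tool_calls(messages):
--     nexts = messages[1:] + [None]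
--     return [
--         m
--         for m, nm in zip(messages, nexts)
--         if not ("tool_calls" in m and (nm is None or "tool_call_id" not in nm))
--     ]
-- ===== Notes on version B (the rewrite author's own statement) =====
-- stated objective: simpler
-- what changed: Replaces A's stateful loop (running 'expecting tool answer' flag with retroactive slice-deletion and a final trim) by a single stateless comprehension over zip(messages, messages[1:]+[None]) that drops a message predictively by looking at its successor.
import Mathlib
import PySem

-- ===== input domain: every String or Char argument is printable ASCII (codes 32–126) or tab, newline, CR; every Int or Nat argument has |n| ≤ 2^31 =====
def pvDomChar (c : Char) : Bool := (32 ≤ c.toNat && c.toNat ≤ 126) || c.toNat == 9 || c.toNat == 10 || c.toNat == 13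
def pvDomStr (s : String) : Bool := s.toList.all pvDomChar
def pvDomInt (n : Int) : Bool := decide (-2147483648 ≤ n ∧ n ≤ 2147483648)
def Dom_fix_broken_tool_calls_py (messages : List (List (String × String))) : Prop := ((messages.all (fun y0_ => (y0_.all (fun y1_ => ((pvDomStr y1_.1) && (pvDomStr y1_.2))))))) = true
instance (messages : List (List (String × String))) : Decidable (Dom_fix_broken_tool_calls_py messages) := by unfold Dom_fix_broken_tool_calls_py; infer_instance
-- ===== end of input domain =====

-- B replaces A's running flag + retroactive deletion by a stateless look-ahead filter (objective: simpler).

-- ===== PORT A =====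
-- '"k" in m' on a dict = key membership in the association list
def pvHasKey (m : List (String × String)) (k : String) : Bool := m.any (fun kv => kv.1 == k)

-- one iteration of A's for-loop; state = (clean_messages, is_expecting_tool_answer);
-- 'clean_messages[:-1]' = List.dropLast (exact: Python l[:-1] drops the last element, [] on [])
def pvStepA (st : List (List (String × String)) × Bool) (m : List (String × String)) :
    List (List (String × String)) × Bool :=
  let clean := if st.2 && !(pvHasKey m "tool_call_id") then st.1.dropLast else st.1
  (clean ++ [m], pvHasKey m "tool_calls")

def fix_broken_tool_calls_py (messages : List (List (String × String))) : List (List (String × String)) :=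
  let st := messages.foldl pvStepA ([], false)
  if st.2 then st.1.dropLast else st.1

-- ===== PORT B =====
-- 'messages[1:] + [None]' paired by zip; the comprehension keeps m unless it has
-- "tool_calls" and its successor (none at the end) lacks "tool_call_id"
def fix_broken_tool_calls_py_alt (messages : List (List (String × String))) : List (List (String × String)) :=
  let nexts : List (Option (List (String × String))) := (messages.drop 1).map some ++ [none]
  ((messages.zip nexts).filter (fun p =>
      !(pvHasKey p.1 "tool_calls" &&
        (match p.2 with
         | none => true
         | some nm => !(pvHasKey nm "tool_call_id"))))).map Prod.fst

-- ===== PRECONDITION & SPEC =====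
def Spec_fix_broken_tool_calls_py (messages : List (List (String × String))) (out : List (List (String × String))) : Prop := out = fix_broken_tool_calls_py_alt messages
instance (messages : List (List (String × String))) (out : List (List (String × String))) : Decidable (Spec_fix_broken_tool_calls_py messages out) := by unfold Spec_fix_broken_tool_calls_py; infer_instance

-- ===== CLAIM (what is proved, stated in full; the proofs are below) =====
def Claim_equal_fix_broken_tool_calls_py : Prop := ∀ (messages : List (List (String × String))), Dom_fix_broken_tool_calls_py messages → Spec_fix_broken_tool_calls_py messages (fix_broken_tool_calls_py messages)

-- ===== LEMMAS AND PROOFS =====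

-- B on a singleton
lemma alt_single (m : List (String × String)) :
    fix_broken_tool_calls_py_alt [m] = if pvHasKey m "tool_calls" then [] else [m] := by
  simp [fix_broken_tool_calls_py_alt, List.filter, List.zip]
  cases pvHasKey m "tool_calls" <;> simp

-- B peels its head pair off
lemma alt_cons (m m' : List (String × String)) (rest : List (List (String × String))) :
    fix_broken_tool_calls_py_alt (m :: m' :: rest) =
      (if pvHasKey m "tool_calls" && !(pvHasKey m' "tool_call_id") then [] else [m]) ++
        fix_broken_tool_calls_py_alt (m' :: rest) := by
  simp only [fix_broken_tool_calls_py_alt, List.drop_one, List.tail_cons, List.map_cons,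
    List.cons_append, List.zip_cons_cons, List.filter_cons, List.map_cons]
  cases h : pvHasKey m "tool_calls" && !(pvHasKey m' "tool_call_id") <;> simp [h]

-- main invariant: running A's loop from state (C ++ [m], flag-of-m) appends B's answer for m :: ms
lemma loop_eq (ms : List (List (String × String))) :
    ∀ (C : List (List (String × String))) (m : List (String × String)),
      (let st := ms.foldl pvStepA (C ++ [m], pvHasKey m "tool_calls")
       if st.2 then st.1.dropLast else st.1) =
      C ++ fix_broken_tool_calls_py_alt (m :: ms) := by
  induction ms with
  | nil =>
    intro C m
    simp [alt_single]
    cases h : pvHasKey m "tool_calls" <;> simp [h]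
  | cons m' rest ih =>
    intro C m
    have step : pvStepA (C ++ [m], pvHasKey m "tool_calls") m' =
        ((C ++ (if pvHasKey m "tool_calls" && !(pvHasKey m' "tool_call_id") then [] else [m])) ++ [m'],
          pvHasKey m' "tool_calls") := by
      simp only [pvStepA]
      split_ifs <;> simp_all
    simp only [List.foldl_cons, step, ih, alt_cons]
    simp

-- ===== VERDICT (by name: the statement is the Claim_ definition above) =====
theorem fix_broken_tool_calls_py_spec : Claim_equal_fix_broken_tool_calls_py := by
  intro messages _
  unfold Spec_fix_broken_tool_calls_py fix_broken_tool_calls_py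
  cases messages with
  | nil => simp [fix_broken_tool_calls_py_alt]
  | cons m rest =>
    have := loop_eq rest [] m
    simpa using this
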